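-- pv_equiv track=rewrite | github.com/ohtjqkd/algorithm | backjoon/2667.py | solution
-- ===== SOURCE A (Python) =====
-- def solution(arr, n):
--     cnt = 0
--     areas = []
--     def count_area(x, y):
--         ret = 1
--         arr[x][y] = 0
--         dx, dy = [0, 0, 1, -1], [1, -1, 0, 0]
--         for i in range(4):
--             xx, yy = x+dx[i], y+dy[i]
--             if 0 <= xx < n and 0 <= yy <n and arr[xx][yy] == 1:
--                 ret += count_area(xx, yy)
--         return ret
--     for i in range(n):
--         for j in range(n):
--             if arr[i][j] == 1:
--                 cnt += 1
--                 areas.append(count_area(i, j))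
--
--     return [cnt] + sorted(areas)
-- ===== SOURCE B (Python) =====
-- def solution(arr, n):
--     cnt = 0
--     areas = []
--     dx = [0, 0, 1, -1]
--     dy = [1, -1, 0, 0]
--     for i in range(n):
--         for j in range(n):
--             if arr[i][j] != 1:
--                 continue
--             cnt += 1
--             arr[i][j] = 0
--             size = 1
--             stack = [(i, j, 0)]
--             while stack:
--                 x, y, d = stack.pop()
--                 if d >= 4:
--                     continue
--                 stack.append((x, y, d + 1))
--                 xx, yy = x + dx[d], y + dy[d]
--                 if 0 <= xx < n and 0 <= yy < n and arr[xx][yy] == 1: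
--                     arr[xx][yy] = 0
--                     size += 1
--                     stack.append((xx, yy, 0))
--             areas.append(size)
--     return [cnt] + sorted(areas)
-- ===== Notes on version B (the rewrite author's own statement) =====
-- stated objective: alternative
-- what changed: The recursive count_area flood fill is replaced by an iterative explicit-stack loop (frames carry a cell and its next direction index), so region sizes are computed without Python recursion; the outer scan and sorting are unchanged.
import Mathlib
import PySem

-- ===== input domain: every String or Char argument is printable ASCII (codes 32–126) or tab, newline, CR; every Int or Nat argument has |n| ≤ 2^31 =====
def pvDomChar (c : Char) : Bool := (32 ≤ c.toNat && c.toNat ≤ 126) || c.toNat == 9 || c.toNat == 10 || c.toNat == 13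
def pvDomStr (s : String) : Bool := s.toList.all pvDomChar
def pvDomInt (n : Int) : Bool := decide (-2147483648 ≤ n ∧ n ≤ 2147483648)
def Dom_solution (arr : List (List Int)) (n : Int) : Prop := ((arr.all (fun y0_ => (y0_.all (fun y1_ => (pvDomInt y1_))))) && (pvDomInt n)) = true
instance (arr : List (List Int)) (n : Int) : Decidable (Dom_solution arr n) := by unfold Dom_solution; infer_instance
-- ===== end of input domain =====

-- B replaces A's recursive count_area flood fill by an iterative explicit-stack loop (same marking order);
-- the equivalence is about the RETURN value only: both Pythons zero the visited cells of `arr` in place identically.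

-- shared grid helpers (exact transliterations of the Python indexing on the in-range
-- accesses both programs perform; all reachable accesses are guarded by 0 ≤ · < n)
def getCell (g : List (List Int)) (x y : Int) : Int :=
  PySem.List.pyGetD (PySem.List.pyGetD g x []) y 0

def setCell (g : List (List Int)) (x y v : Int) : List (List Int) :=
  PySem.List.pySetD g x (PySem.List.pySetD (PySem.List.pyGetD g x []) y v)

-- dx, dy = [0, 0, 1, -1], [1, -1, 0, 0]
def dxF : Nat → Int | 0 => 0 | 1 => 0 | 2 => 1 | _ => -1
def dyF : Nat → Int | 0 => 1 | 1 => -1 | 2 => 0 | _ => 0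

-- number of cells equal to 1 (used only to compute sufficient fuel for the ports' loops)
def rowOnes (r : List Int) : Nat := r.count 1
def ones (g : List (List Int)) : Nat := (g.map rowOnes).sum

-- ===== PORT A =====
-- one direction step of count_area's `for i in range(4)` loop (rec = the recursive call)
def dstep (n : Int) (rec : List (List Int) → Int → Int → Int × List (List Int)) (x y : Int)
    (st : Int × List (List Int)) (d : Nat) : Int × List (List Int) :=
  if 0 ≤ x + dxF d ∧ x + dxF d < n ∧ 0 ≤ y + dyF d ∧ y + dyF d < n ∧
      getCell st.2 (x + dxF d) (y + dyF d) = 1 then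
    ((st.1 + (rec st.2 (x + dxF d) (y + dyF d)).1), (rec st.2 (x + dxF d) (y + dyF d)).2)
  else st

-- count_area, with a fuel bound on the recursion depth (called with fuel = ones g + 1,
-- which always suffices: each nested call zeroes a fresh 1-cell first)
def caF (n : Int) : Nat → List (List Int) → Int → Int → Int × List (List Int)
  | 0, g, x, y => (1, setCell g x y 0)      -- never reached with sufficient fuel
  | fuel+1, g, x, y =>
    [0, 1, 2, 3].foldl (dstep n (caF n fuel) x y) (1, setCell g x y 0)

def solution (arr : List (List Int)) (n : Int) : List Int :=
  let st := (PySem.List.pyRange 0 n 1).foldl (fun st1 i =>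
    (PySem.List.pyRange 0 n 1).foldl (fun st2 j =>
      if getCell st2.2.2 i j = 1 then
        let p := caF n (ones st2.2.2 + 1) st2.2.2 i j
        (st2.1 + 1, st2.2.1 ++ [p.1], p.2)
      else st2) st1) ((0 : Int), ([] : List Int), arr)
  st.1 :: PySem.List.sorted st.2.1 (fun a => a) false

-- ===== PORT B =====
-- the explicit-stack loop: frames (x, y, d) = "cell (x,y), next direction d"; the fuel
-- bounds the number of loop iterations (each iteration strictly decreases
-- 5*ones g + Σ_frames (5 - min d 4), so the fuel computed at the call site suffices)
def machBF (n : Int) : Nat → List (List Int) → List (Int × Int × Nat) → Int → Int × List (List Int)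
  | 0, g, _, size => (size, g)              -- never reached with sufficient fuel
  | _+1, g, [], size => (size, g)
  | fuel+1, g, (x, y, d) :: s, size =>
    if 4 ≤ d then machBF n fuel g s size
    else if 0 ≤ x + dxF d ∧ x + dxF d < n ∧ 0 ≤ y + dyF d ∧ y + dyF d < n ∧
        getCell g (x + dxF d) (y + dyF d) = 1 then
      machBF n fuel (setCell g (x + dxF d) (y + dyF d) 0)
        ((x + dxF d, y + dyF d, 0) :: (x, y, d + 1) :: s) (size + 1)
    else machBF n fuel g ((x, y, d + 1) :: s) size

def solution_alt (arr : List (List Int)) (n : Int) : List Int :=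
  let st := (PySem.List.pyRange 0 n 1).foldl (fun st1 i =>
    (PySem.List.pyRange 0 n 1).foldl (fun st2 j =>
      if getCell st2.2.2 i j ≠ 1 then st2
      else
        let g1 := setCell st2.2.2 i j 0
        let p := machBF n (5 * ones g1 + 6) g1 [(i, j, 0)] 1
        (st2.1 + 1, st2.2.1 ++ [p.1], p.2)) st1) ((0 : Int), ([] : List Int), arr)
  st.1 :: PySem.List.sorted st.2.1 (fun a => a) false

-- ===== PRECONDITION & SPEC =====
-- Pre_ excludes exactly the inputs where A raises IndexError: the n×n scan demands at
-- least n rows each of length at least n.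
def Pre_solution (arr : List (List Int)) (n : Int) : Prop :=
  n ≤ arr.length ∧ ∀ r ∈ arr.take n.toNat, n ≤ (r.length : Int)
instance (arr : List (List Int)) (n : Int) : Decidable (Pre_solution arr n) := by
  unfold Pre_solution; infer_instance

def pvWitness_solution : List (List Int) × Int := ([[1, 0, 1], [1, 1, 0], [0, 0, 1]], 3)

def Spec_solution (arr : List (List Int)) (n : Int) (out : List Int) : Prop := out = solution_alt arr n
instance (arr : List (List Int)) (n : Int) (out : List Int) : Decidable (Spec_solution arr n out) := by unfold Spec_solution; infer_instance

-- ===== CLAIM (what is proved, stated in full; the proofs are below) =====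
def Claim_equal_solution : Prop := ∀ (arr : List (List Int)) (n : Int), Dom_solution arr n → Pre_solution arr n → Spec_solution arr n (solution arr n)

-- ===== LEMMAS AND PROOFS =====

-- row/grid counting lemmas
theorem count_set_zero_lem : ∀ (r : List Int) (j : Nat), r[j]? = some 1 → (r.set j 0).count 1 + 1 = r.count 1 := by
  intro r
  induction r with
  | nil => intro j h; simp at h
  | cons a t ih =>
    intro j h
    cases j with
    | zero =>
      simp at h
      subst h
      simp
    | succ j =>
      simp at h
      have := ih j h
      simp [List.count_cons]
      omega

theorem ones_set_row_lem : ∀ (g : List (List Int)) (i : Nat) (r r' : List Int),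
    g[i]? = some r → rowOnes r' + 1 = rowOnes r → ones (g.set i r') + 1 = ones g := by
  intro g
  induction g with
  | nil => intro i r r' h; simp at h
  | cons a t ih =>
    intro i r r' h hr
    cases i with
    | zero =>
      simp at h
      subst h
      simp [ones]
      omega
    | succ i =>
      simp at h
      have := ih i r r' h hr
      simp [ones] at this ⊢
      omega

theorem ones_set_zero_lem (g : List (List Int)) (x y : Int) (hx : 0 ≤ x) (hy : 0 ≤ y)
    (h1 : getCell g x y = 1) : ones (setCell g x y 0) + 1 = ones g := by
  unfold getCell at h1
  unfold setCell
  rw [PySem.List.pyGetD_of_nonneg _ _ hx] at h1 ⊢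
  rw [PySem.List.pyGetD_of_nonneg _ _ hy] at h1
  rw [PySem.List.pySetD_of_nonneg _ _ hy, PySem.List.pySetD_of_nonneg _ _ hx]
  have hG : g.getD x.toNat [] = g[x.toNat]?.getD [] := List.getD_eq_getElem?_getD
  rw [hG] at h1 ⊢
  rcases hrow : g[x.toNat]? with _ | r
  · rw [hrow] at h1
    simp at h1
  · rw [hrow] at h1
    simp only [Option.getD_some] at h1 ⊢
    have hR : r.getD y.toNat 0 = r[y.toNat]?.getD 0 := List.getD_eq_getElem?_getD
    rw [hR] at h1
    rcases hc : r[y.toNat]? with _ | c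
    · rw [hc] at h1
      simp at h1
    · rw [hc] at h1
      simp only [Option.getD_some] at h1
      subst h1
      exact ones_set_row_lem g x.toNat r _ hrow (count_set_zero_lem r y.toNat hc)

-- the ret-accumulator of A's direction loop is additive in its initial value
theorem foldl_dstep_shift (n : Int) (rec : List (List Int) → Int → Int → Int × List (List Int))
    (x y : Int) : ∀ (ds : List Nat) (g : List (List Int)) (a : Int),
    ds.foldl (dstep n rec x y) (a, g)
      = (a + (ds.foldl (dstep n rec x y) ((0 : Int), g)).1,
         (ds.foldl (dstep n rec x y) ((0 : Int), g)).2) := by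
  intro ds
  induction ds with
  | nil => intro g a; simp
  | cons d ds ih =>
    intro g a
    simp only [List.foldl_cons]
    by_cases h : 0 ≤ x + dxF d ∧ x + dxF d < n ∧ 0 ≤ y + dyF d ∧ y + dyF d < n ∧
        getCell g (x + dxF d) (y + dyF d) = 1
    · simp only [dstep, if_pos h]
      rw [ih _ (a + (rec g (x + dxF d) (y + dyF d)).1),
          ih _ ((0 : Int) + (rec g (x + dxF d) (y + dyF d)).1)]
      simp only [Prod.mk.injEq]
      exact ⟨by omega, by trivial⟩
    · simp only [dstep, if_neg h]
      exact ih g a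

-- A's recursion only removes 1-cells: the count of ones strictly drops at each seeded call …
theorem ones_caF_lt (n : Int) : ∀ (fuel : Nat) (g : List (List Int)) (x y : Int),
    0 ≤ x → 0 ≤ y → getCell g x y = 1 → ones (caF n fuel g x y).2 < ones g := by
  intro fuel
  induction fuel with
  | zero =>
    intro g x y hx hy h1
    have := ones_set_zero_lem g x y hx hy h1
    simp only [caF]
    omega
  | succ f ih =>
    intro g x y hx hy h1
    have hset := ones_set_zero_lem g x y hx hy h1
    have hloop : ∀ (ds : List Nat) (st : Int × List (List Int)),
        ones ((ds.foldl (dstep n (caF n f) x y) st).2) ≤ ones st.2 := by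
      intro ds
      induction ds with
      | nil => intro st; simp
      | cons d ds ihd =>
        intro st
        simp only [List.foldl_cons]
        refine le_trans (ihd _) ?_
        by_cases h : 0 ≤ x + dxF d ∧ x + dxF d < n ∧ 0 ≤ y + dyF d ∧ y + dyF d < n ∧
            getCell st.2 (x + dxF d) (y + dyF d) = 1
        · simp only [dstep, if_pos h]
          exact le_of_lt (ih st.2 _ _ h.1 h.2.2.1 h.2.2.2.2)
        · simp only [dstep, if_neg h]
          exact le_rfl
    simp only [caF]
    refine lt_of_le_of_lt (hloop [0, 1, 2, 3] (1, setCell g x y 0)) ?_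
    show ones (setCell g x y 0) < ones g
    omega

-- … and so does the loop itself (stated for the loop as its own fold)
theorem ones_foldl_dstep_le (n : Int) (fuel : Nat) (x y : Int) :
    ∀ (ds : List Nat) (st : Int × List (List Int)),
    ones ((ds.foldl (dstep n (caF n fuel) x y) st).2) ≤ ones st.2 := by
  intro ds
  induction ds with
  | nil => intro st; simp
  | cons d ds ihd =>
    intro st
    simp only [List.foldl_cons]
    refine le_trans (ihd _) ?_
    by_cases h : 0 ≤ x + dxF d ∧ x + dxF d < n ∧ 0 ≤ y + dyF d ∧ y + dyF d < n ∧
        getCell st.2 (x + dxF d) (y + dyF d) = 1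
    · simp only [dstep, if_pos h]
      exact le_of_lt (ones_caF_lt n fuel st.2 _ _ h.1 h.2.2.1 h.2.2.2.2)
    · simp only [dstep, if_neg h]
      exact le_rfl

-- stack-machine measure: each machBF iteration strictly decreases 5*ones g + wsum s
def wsum (s : List (Int × Int × Nat)) : Nat := (s.map (fun f => 5 - min f.2.2 4)).sum

-- above the measure, the fuel is irrelevant
theorem machBF_irrel (n : Int) : ∀ (f1 f2 : Nat) (g : List (List Int))
    (s : List (Int × Int × Nat)) (size : Int),
    5 * ones g + wsum s < f1 → 5 * ones g + wsum s < f2 →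
    machBF n f1 g s size = machBF n f2 g s size := by
  intro f1
  induction f1 using Nat.strong_induction_on with
  | _ f1 ih =>
    intro f2 g s size h1 h2
    obtain ⟨a, rfl⟩ : ∃ a, f1 = a + 1 := ⟨f1 - 1, by omega⟩
    obtain ⟨b, rfl⟩ : ∃ b, f2 = b + 1 := ⟨f2 - 1, by omega⟩
    cases s with
    | nil => simp [machBF]
    | cons fr s =>
      obtain ⟨x, y, d⟩ := fr
      simp only [machBF]
      simp only [wsum, List.map_cons, List.sum_cons] at h1 h2
      by_cases hd : 4 ≤ d
      · simp only [if_pos hd]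
        exact ih a (by omega) b g s size (by simp [wsum]; omega) (by simp [wsum]; omega)
      · simp only [if_neg hd]
        by_cases hg : 0 ≤ x + dxF d ∧ x + dxF d < n ∧ 0 ≤ y + dyF d ∧ y + dyF d < n ∧
            getCell g (x + dxF d) (y + dyF d) = 1
        · simp only [if_pos hg]
          have hone := ones_set_zero_lem g _ _ hg.1 hg.2.2.1 hg.2.2.2.2
          exact ih a (by omega) b _ _ _
            (by simp [wsum]; omega) (by simp [wsum]; omega)
        · simp only [if_neg hg]
          exact ih a (by omega) b _ _ _
            (by simp [wsum]; omega) (by simp [wsum]; omega)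

-- the machine run at its canonical (always sufficient) fuel
def mrun (n : Int) (g : List (List Int)) (s : List (Int × Int × Nat)) (size : Int) :
    Int × List (List Int) :=
  machBF n (5 * ones g + wsum s + 1) g s size

theorem mrun_nil (n : Int) (g : List (List Int)) (size : Int) : mrun n g [] size = (size, g) := by
  simp [mrun, machBF]

theorem mrun_pop (n : Int) (g : List (List Int)) (x y : Int) (d : Nat)
    (s : List (Int × Int × Nat)) (size : Int) (hd : 4 ≤ d) :
    mrun n g ((x, y, d) :: s) size = mrun n g s size := by
  unfold mrun
  conv_lhs => rw [machBF]
  simp only [if_pos hd]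
  exact machBF_irrel n _ _ g s size (by simp [wsum]) (by omega)

theorem mrun_inc (n : Int) (g : List (List Int)) (x y : Int) (d : Nat)
    (s : List (Int × Int × Nat)) (size : Int) (hd : ¬ 4 ≤ d)
    (hg : ¬ (0 ≤ x + dxF d ∧ x + dxF d < n ∧ 0 ≤ y + dyF d ∧ y + dyF d < n ∧
      getCell g (x + dxF d) (y + dyF d) = 1)) :
    mrun n g ((x, y, d) :: s) size = mrun n g ((x, y, d + 1) :: s) size := by
  unfold mrun
  conv_lhs => rw [machBF]
  simp only [if_neg hd, if_neg hg]
  exact machBF_irrel n _ _ g _ size (by simp [wsum]; omega) (by omega)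

theorem mrun_push (n : Int) (g : List (List Int)) (x y : Int) (d : Nat)
    (s : List (Int × Int × Nat)) (size : Int) (hd : ¬ 4 ≤ d)
    (hg : 0 ≤ x + dxF d ∧ x + dxF d < n ∧ 0 ≤ y + dyF d ∧ y + dyF d < n ∧
      getCell g (x + dxF d) (y + dyF d) = 1) :
    mrun n g ((x, y, d) :: s) size
      = mrun n (setCell g (x + dxF d) (y + dyF d) 0)
          ((x + dxF d, y + dyF d, 0) :: (x, y, d + 1) :: s) (size + 1) := by
  have hone := ones_set_zero_lem g _ _ hg.1 hg.2.2.1 hg.2.2.2.2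
  unfold mrun
  conv_lhs => rw [machBF]
  simp only [if_neg hd, if_pos hg]
  exact machBF_irrel n _ _ _ _ _ (by simp [wsum]; omega) (by omega)

-- SIMULATION: one stack frame (x, y, 4-k) behaves like the tail of A's direction loop
theorem sim (n : Int) (fuel : Nat) : ∀ (k : Nat), k ≤ 4 →
    ∀ (g : List (List Int)) (x y : Int) (s : List (Int × Int × Nat)) (size : Int),
    ones g ≤ fuel →
    mrun n g ((x, y, 4 - k) :: s) size
      = mrun n ((List.range' (4 - k) k).foldl (dstep n (caF n fuel) x y) ((0 : Int), g)).2 s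
          (size + ((List.range' (4 - k) k).foldl (dstep n (caF n fuel) x y) ((0 : Int), g)).1) := by
  induction fuel using Nat.strong_induction_on with
  | _ fuel ihf =>
    intro k
    induction k with
    | zero =>
      intro _ g x y s size _
      rw [mrun_pop n g x y (4 - 0) s size (by omega)]
      simp
    | succ k ihk =>
      intro hk4 g x y s size hone
      have hd4 : 4 - (k + 1) = 3 - k := by omega
      have harith : 3 - k + 1 = 4 - k := by omega
      rw [hd4, List.range'_succ, harith]
      by_cases hg : 0 ≤ x + dxF (3 - k) ∧ x + dxF (3 - k) < n ∧
          0 ≤ y + dyF (3 - k) ∧ y + dyF (3 - k) < n ∧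
          getCell g (x + dxF (3 - k)) (y + dyF (3 - k)) = 1
      · have hset := ones_set_zero_lem g _ _ hg.1 hg.2.2.1 hg.2.2.2.2
        obtain ⟨f, rfl⟩ : ∃ f, fuel = f + 1 := ⟨fuel - 1, by omega⟩
        rw [mrun_push n g x y (3 - k) s size (by omega) hg, harith]
        -- RHS: evaluate the first step of A's direction loop and split off its recursion
        simp only [List.foldl_cons, dstep, if_pos hg]
        rw [show caF n (f + 1) g (x + dxF (3 - k)) (y + dyF (3 - k))
            = ([0, 1, 2, 3].foldl
                (dstep n (caF n f) (x + dxF (3 - k)) (y + dyF (3 - k)))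
                ((1 : Int), setCell g (x + dxF (3 - k)) (y + dyF (3 - k)) 0)) from rfl]
        rw [foldl_dstep_shift n (caF n f) (x + dxF (3 - k)) (y + dyF (3 - k)) [0, 1, 2, 3]]
        dsimp only
        rw [foldl_dstep_shift n (caF n (f + 1)) x y (List.range' (4 - k) k)]
        dsimp only
        -- LHS: the pushed frame runs the recursive call (ihf), then the resumed frame (ihk)
        have hsim0 := ihf f (by omega) 4 (by omega)
          (setCell g (x + dxF (3 - k)) (y + dyF (3 - k)) 0)
          (x + dxF (3 - k)) (y + dyF (3 - k))
          ((x, y, 4 - k) :: s) (size + 1) (by omega)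
        norm_num at hsim0
        rw [show List.range' 0 4 = [0, 1, 2, 3] from rfl] at hsim0
        rw [hsim0]
        have hG1le : ones ([0, 1, 2, 3].foldl
            (dstep n (caF n f) (x + dxF (3 - k)) (y + dyF (3 - k)))
            ((0 : Int), setCell g (x + dxF (3 - k)) (y + dyF (3 - k)) 0)).2
            ≤ ones (setCell g (x + dxF (3 - k)) (y + dyF (3 - k)) 0) := by
          simpa using ones_foldl_dstep_le n f (x + dxF (3 - k)) (y + dyF (3 - k))
            [0, 1, 2, 3] ((0 : Int), setCell g (x + dxF (3 - k)) (y + dyF (3 - k)) 0)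
        rw [ihk (by omega) ([0, 1, 2, 3].foldl
            (dstep n (caF n f) (x + dxF (3 - k)) (y + dyF (3 - k)))
            ((0 : Int), setCell g (x + dxF (3 - k)) (y + dyF (3 - k)) 0)).2 x y s _ (by omega)]
        congr 1
        omega
      · rw [mrun_inc n g x y (3 - k) s size (by omega) hg, harith]
        simp only [List.foldl_cons, dstep, if_neg hg]
        exact ihk (by omega) g x y s size hone

-- ===== VERDICT (by name: the statement is the Claim_ definition above) =====
theorem solution_spec : Claim_equal_solution := by
  unfold Claim_equal_solution
  intro arr n _ _
  unfold Spec_solution solution solution_alt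
  have hfold :
      (PySem.List.pyRange 0 n 1).foldl (fun st1 i =>
        (PySem.List.pyRange 0 n 1).foldl (fun st2 j =>
          if getCell st2.2.2 i j = 1 then
            let p := caF n (ones st2.2.2 + 1) st2.2.2 i j
            (st2.1 + 1, st2.2.1 ++ [p.1], p.2)
          else st2) st1) ((0 : Int), ([] : List Int), arr)
      = (PySem.List.pyRange 0 n 1).foldl (fun st1 i =>
        (PySem.List.pyRange 0 n 1).foldl (fun st2 j =>
          if getCell st2.2.2 i j ≠ 1 then st2
          else
            let g1 := setCell st2.2.2 i j 0
            let p := machBF n (5 * ones g1 + 6) g1 [(i, j, 0)] 1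
            (st2.1 + 1, st2.2.1 ++ [p.1], p.2)) st1) ((0 : Int), ([] : List Int), arr) := by
    apply PySem.List.foldl_congr_mem
    intro acc i hi
    apply PySem.List.foldl_congr_mem
    intro acc2 j hj
    have hi' : 0 ≤ i := (PySem.List.mem_pyRange_one.mp hi).1
    have hj' : 0 ≤ j := (PySem.List.mem_pyRange_one.mp hj).1
    by_cases h1 : getCell acc2.2.2 i j = 1
    · simp [h1]
      have hset := ones_set_zero_lem acc2.2.2 i j hi' hj' h1
      have hport : machBF n (5 * ones (setCell acc2.2.2 i j 0) + 6)
          (setCell acc2.2.2 i j 0) [(i, j, 0)] 1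
          = mrun n (setCell acc2.2.2 i j 0) [(i, j, 0)] 1 :=
        machBF_irrel n _ _ _ _ _ (by simp [wsum]) (by omega)
      have hs := sim n (ones acc2.2.2) 4 (by omega) (setCell acc2.2.2 i j 0) i j [] 1
        (by omega)
      norm_num at hs
      rw [show List.range' 0 4 = [0, 1, 2, 3] from rfl] at hs
      have hca : caF n (ones acc2.2.2 + 1) acc2.2.2 i j
          = ([0, 1, 2, 3].foldl (dstep n (caF n (ones acc2.2.2)) i j)
              ((1 : Int), setCell acc2.2.2 i j 0)) := rfl
      rw [hport, hs, mrun_nil, hca, foldl_dstep_shift]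
      exact ⟨rfl, rfl⟩
    · simp [h1]
  rw [hfold]
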